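-- pv_equiv track=rewrite | github.com/AlexD796/IP-2C2024 | Python/Parciales/simulacro2023.py | contar_traducciones_iguales
-- ===== SOURCE A (Python) =====
-- def pertenece (e:int, seq:list[int]) -> bool:
--     res:bool=False
--
--     for elem in seq:
--         if elem==e:
--             res = True
--
--     return res
--
-- def contar_traducciones_iguales (ing: dict[str,str], ale: dict[str,str]) -> int:
--     contador:int=0
--
--     for c, v in ing.items (): #c=vidrio #v=glass
--         if pertenece (c, ale.keys()): #no... #c=arbol #v=tree
--            v2:str = ale[c] #v2= jasjas
--            if v2==v:
--                contador+=1
--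
--     return contador
-- ===== SOURCE B (Python) =====
-- def contar_traducciones_iguales(ing: dict, ale: dict) -> int:
--     return len(ing.items() & ale.items())
-- ===== Notes on version B (the rewrite author's own statement) =====
-- stated objective: idiomatic
-- what changed: Replaces the nested scan (for each English key, a linear membership pass over ale's keys, then a lookup and a comparison branch) by a single hash-based set intersection of the two dicts' item views, len(ing.items() & ale.items()).
import Mathlib
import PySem

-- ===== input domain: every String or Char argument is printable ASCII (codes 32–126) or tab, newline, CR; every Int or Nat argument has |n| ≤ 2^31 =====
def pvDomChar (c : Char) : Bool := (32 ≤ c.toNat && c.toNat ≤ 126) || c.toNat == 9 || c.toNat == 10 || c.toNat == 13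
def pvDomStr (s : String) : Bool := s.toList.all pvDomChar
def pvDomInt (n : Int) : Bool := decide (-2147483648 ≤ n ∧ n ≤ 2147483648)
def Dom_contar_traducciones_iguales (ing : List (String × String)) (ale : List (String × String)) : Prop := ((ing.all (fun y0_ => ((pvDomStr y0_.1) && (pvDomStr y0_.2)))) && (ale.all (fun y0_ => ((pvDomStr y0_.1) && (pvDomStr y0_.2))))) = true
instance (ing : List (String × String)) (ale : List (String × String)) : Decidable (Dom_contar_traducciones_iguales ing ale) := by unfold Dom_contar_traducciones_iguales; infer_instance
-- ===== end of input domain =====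

-- B replaces A's nested scan by a single set intersection of the two dicts' item views.
-- Pre_ restricts to association lists whose keys are distinct — the only lists that represent a Python dict.
-- ===== PORT A =====
def pertenece (e : String) (seq : List String) : Bool :=
  seq.foldl (fun res elem => if elem == e then true else res) false

def contar_traducciones_iguales (ing : List (String × String)) (ale : List (String × String)) : Int :=
  ing.foldl (fun contador cv =>
    if pertenece cv.1 (ale.map Prod.fst) then
      match ale.lookup cv.1 with   -- ale[c]: first-match lookup; `none` is unreachable (pertenece just held)
      | some v2 => if v2 == cv.2 then contador + 1 else contador
      | none => contador
    else contador) 0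

-- ===== PORT B =====
-- Source B: return len(ing.items() & ale.items())
def contar_traducciones_iguales_alt (ing : List (String × String)) (ale : List (String × String)) : Int :=
  ((PySem.Set.inter (PySem.Set.ofList ing) ale).length : Int)

-- ===== PRECONDITION & SPEC =====
-- Both arguments are Python dicts, whose keys are necessarily distinct; Pre_ excludes only
-- association lists with a repeated key, which represent no Python input at all.
def Pre_contar_traducciones_iguales (ing : List (String × String)) (ale : List (String × String)) : Prop :=
  (ing.map Prod.fst).Nodup ∧ (ale.map Prod.fst).Nodup
instance (ing : List (String × String)) (ale : List (String × String)) : Decidable (Pre_contar_traducciones_iguales ing ale) := by unfold Pre_contar_traducciones_iguales; infer_instance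

def pvWitness_contar_traducciones_iguales : (List (String × String)) × (List (String × String)) :=
  ([("vidrio", "glass"), ("arbol", "tree")], [("vidrio", "glass"), ("casa", "house")])

def Spec_contar_traducciones_iguales (ing : List (String × String)) (ale : List (String × String)) (out : Int) : Prop := out = contar_traducciones_iguales_alt ing ale
instance (ing : List (String × String)) (ale : List (String × String)) (out : Int) : Decidable (Spec_contar_traducciones_iguales ing ale out) := by unfold Spec_contar_traducciones_iguales; infer_instance

-- ===== CLAIM (what is proved, stated in full; the proofs are below) =====
def Claim_equal_contar_traducciones_iguales : Prop := ∀ (ing : List (String × String)) (ale : List (String × String)), Dom_contar_traducciones_iguales ing ale → Pre_contar_traducciones_iguales ing ale → Spec_contar_traducciones_iguales ing ale (contar_traducciones_iguales ing ale)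

-- ===== LEMMAS AND PROOFS =====
lemma pertenece_aux (e : String) (seq : List String) (b : Bool) :
    seq.foldl (fun res elem => if elem == e then true else res) b = (b || seq.any (· == e)) := by
  induction seq generalizing b with
  | nil => simp
  | cons x xs ih =>
    simp only [List.foldl_cons, List.any_cons, ih]
    by_cases hx : (x == e) = true <;> simp [hx]

lemma pertenece_iff (e : String) (seq : List String) : pertenece e seq = true ↔ e ∈ seq := by
  unfold pertenece
  rw [pertenece_aux]
  simp [List.any_eq_true]

lemma lookup_mem_iff (ale : List (String × String)) (h : (ale.map Prod.fst).Nodup)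
    (c v : String) : ale.lookup c = some v ↔ (c, v) ∈ ale := by
  induction ale with
  | nil => simp
  | cons p t ih =>
    simp only [List.map_cons, List.nodup_cons, List.mem_map] at h
    obtain ⟨hp, ht⟩ := h
    obtain ⟨k, w⟩ := p
    by_cases hc : c = k
    · subst hc
      constructor
      · intro hl
        simp [List.lookup] at hl
        simp [hl]
      · intro hm
        rcases List.mem_cons.mp hm with he | hmt
        · rw [Prod.mk.injEq] at he
          simp [List.lookup, he.2]
        · exact absurd ⟨(c, v), hmt, rfl⟩ hp
    · have hck : (c == k) = false := by simp [hc]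
      have hne : (c, v) ≠ (k, w) := by simp [hc]
      simp [List.lookup, hck, List.mem_cons, hne, ih ht]

-- ===== VERDICT (by name: the statement is the Claim_ definition above) =====
theorem contar_traducciones_iguales_spec : Claim_equal_contar_traducciones_iguales := by
  intro ing ale _hdom hpre
  obtain ⟨hing, hale⟩ := hpre
  unfold Spec_contar_traducciones_iguales contar_traducciones_iguales contar_traducciones_iguales_alt
  have hstep : (fun (contador : Int) (cv : String × String) =>
      if pertenece cv.1 (ale.map Prod.fst) then
        match ale.lookup cv.1 with
        | some v2 => if v2 == cv.2 then contador + 1 else contador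
        | none => contador
      else contador)
      = (fun contador cv => if ale.contains cv then contador + 1 else contador) := by
    funext contador cv
    by_cases hmem : cv.1 ∈ ale.map Prod.fst
    · rw [if_pos ((pertenece_iff _ _).mpr hmem)]
      obtain ⟨p, hpmem, hpfst⟩ := List.mem_map.mp hmem
      have hv2 : ale.lookup cv.1 = some p.2 := by
        rw [lookup_mem_iff ale hale]
        rw [show (cv.1, p.2) = p from by rw [← hpfst]]
        exact hpmem
      rw [hv2]
      by_cases hv : p.2 = cv.2
      · have hin : cv ∈ ale := by
          rw [← lookup_mem_iff ale hale cv.1 cv.2, ← hv, hv2]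
        simp [hv, hin]
      · have hnin : cv ∉ ale := by
          intro hin
          have := (lookup_mem_iff ale hale cv.1 cv.2).mpr hin
          rw [hv2] at this
          exact hv (Option.some.injEq _ _ ▸ this)
        have : (p.2 == cv.2) = false := by simp [hv]
        simp [this, hnin]
    · have hnin : cv ∉ ale := fun hin => hmem (List.mem_map_of_mem hin)
      have hpert : pertenece cv.1 (ale.map Prod.fst) = false := by
        rw [← Bool.not_eq_true, pertenece_iff]; exact hmem
      simp [hpert, hnin]
  rw [hstep, PySem.List.foldl_count_if]
  have hnodup : ing.Nodup := hing.of_map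
  have hself : PySem.Set.ofList ing = ing := PySem.Set.ofList_eq_self_of_nodup ing hnodup
  show (0 : Int) + _ = _
  rw [zero_add, show PySem.Set.inter (PySem.Set.ofList ing) ale
      = (PySem.Set.ofList ing).filter (fun x => ale.contains x) from rfl, hself,
    List.countP_eq_length_filter]
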